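-- pv_equiv track=rewrite | github.com/TortReborn/Tort-Reborn | Commands/snipe.py | _format_participants_log
-- ===== SOURCE A (Python) =====
-- from collections import Counter, defaultdict
--
-- _ROLE_ORDER     = ['Healer', 'Tank', 'DPS']
--
-- def _format_participants_log(pairs: list[tuple[str, str]]) -> str:
--     grouped = defaultdict(list)
--     for ign, role in pairs:
--         grouped[role].append(ign)
--     parts = []
--     for role in _ROLE_ORDER:
--         if role in grouped:
--             parts.append(f"{' '.join(grouped[role])} {role}")
--     return ' / '.join(parts)
-- ===== SOURCE B (Python) =====
-- _ROLE_ORDER = ['Healer', 'Tank', 'DPS']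
--
-- def _format_participants_log(pairs):
--     parts = []
--     for role in _ROLE_ORDER:
--         igns = [ign for ign, r in pairs if r == role]
--         if igns:
--             parts.append(f"{' '.join(igns)} {role}")
--     return ' / '.join(parts)
-- ===== Notes on version B (the rewrite author's own statement) =====
-- stated objective: idiomatic
-- what changed: Drops the defaultdict grouping pass entirely: B scans pairs once per fixed role, filtering the IGNs for that role in order, so there is no intermediate dict index.
import Mathlib
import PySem

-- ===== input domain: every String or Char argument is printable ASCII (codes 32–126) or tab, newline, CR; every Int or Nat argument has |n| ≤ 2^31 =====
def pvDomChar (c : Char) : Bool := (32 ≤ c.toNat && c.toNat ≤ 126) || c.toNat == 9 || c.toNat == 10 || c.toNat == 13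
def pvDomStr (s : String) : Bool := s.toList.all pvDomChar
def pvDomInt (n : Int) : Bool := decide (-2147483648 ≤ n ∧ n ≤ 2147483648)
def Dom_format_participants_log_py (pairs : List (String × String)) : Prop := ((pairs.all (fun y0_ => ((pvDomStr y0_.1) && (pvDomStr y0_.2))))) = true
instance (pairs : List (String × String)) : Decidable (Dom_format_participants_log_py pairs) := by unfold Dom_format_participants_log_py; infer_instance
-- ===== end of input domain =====

-- B replaces A's defaultdict grouping pass by one ordered filter of `pairs` per fixed role (idiomatic, no intermediate index).

-- ===== PORT A =====
-- _ROLE_ORDER = ['Healer', 'Tank', 'DPS']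
def roleOrder : List String := ["Healer", "Tank", "DPS"]

def format_participants_log_py (pairs : List (String × String)) : String :=
  -- grouped = defaultdict(list); for ign, role in pairs: grouped[role].append(ign)
  let grouped : PySem.Dict String (List String) :=
    pairs.foldl (fun d p => d.modify p.2 [] (· ++ [p.1])) PySem.Dict.empty
  -- parts = []; for role in _ROLE_ORDER: if role in grouped: parts.append(...)
  let parts : List String :=
    roleOrder.foldl (fun parts role =>
      if grouped.contains role then
        parts ++ [PySem.Str.join " " (grouped.getD role []) ++ " " ++ role]
      else parts) []
  PySem.Str.join " / " parts

-- ===== PORT B =====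
def format_participants_log_py_alt (pairs : List (String × String)) : String :=
  -- parts = []; for role in _ROLE_ORDER: igns = [ign for ign, r in pairs if r == role]; if igns: parts.append(...)
  let parts : List String :=
    roleOrder.foldl (fun parts role =>
      let igns := (pairs.filter (fun p => p.2 == role)).map (·.1)
      if igns ≠ [] then parts ++ [PySem.Str.join " " igns ++ " " ++ role]
      else parts) []
  PySem.Str.join " / " parts

-- ===== PRECONDITION & SPEC =====
def Spec_format_participants_log_py (pairs : List (String × String)) (out : String) : Prop := out = format_participants_log_py_alt pairs
instance (pairs : List (String × String)) (out : String) : Decidable (Spec_format_participants_log_py pairs out) := by unfold Spec_format_participants_log_py; infer_instance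

-- ===== CLAIM (what is proved, stated in full; the proofs are below) =====
def Claim_equal_format_participants_log_py : Prop := ∀ (pairs : List (String × String)), Dom_format_participants_log_py pairs → Spec_format_participants_log_py pairs (format_participants_log_py pairs)

-- ===== LEMMAS AND PROOFS =====

-- The grouping fold's lookup at r is the (ordered) list of first components whose second component is r.
theorem grp_getD (l : List (String × String)) (d : PySem.Dict String (List String)) (r : String) :
    (l.foldl (fun d p => d.modify p.2 [] (· ++ [p.1])) d).getD r []
      = d.getD r [] ++ (l.filter (fun p => p.2 == r)).map (·.1) := by
  induction l generalizing d with
  | nil => simp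
  | cons p t ih =>
      simp only [List.foldl_cons, ih, List.filter_cons, PySem.Dict.getD_modify]
      by_cases h : p.2 = r
      · subst h; simp
      · simp [h, Ne.symm h]

-- Membership of a key after the grouping fold: r present iff it was present or some pair carries role r.
theorem grp_contains (l : List (String × String)) (d : PySem.Dict String (List String)) (r : String) :
    (l.foldl (fun d p => d.modify p.2 [] (· ++ [p.1])) d).contains r
      = (d.contains r || l.any (fun p => p.2 == r)) := by
  induction l generalizing d with
  | nil => simp
  | cons p t ih =>
      simp only [List.foldl_cons, ih, List.any_cons, PySem.Dict.contains_modify]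
      rw [show (r == p.2) = (p.2 == r) from by
            by_cases h : p.2 = r
            · simp [h]
            · simp [h, Ne.symm h]]
      cases (p.2 == r) <;> cases d.contains r <;> simp

-- ===== VERDICT (by name: the statement is the Claim_ definition above) =====
theorem format_participants_log_py_spec : Claim_equal_format_participants_log_py := by
  intro pairs _
  unfold Spec_format_participants_log_py format_participants_log_py format_participants_log_py_alt
  have hC : ∀ r : String,
      (((pairs.foldl (fun d p => d.modify p.2 [] (· ++ [p.1])) PySem.Dict.empty).contains r) = true)
        ↔ (((pairs.filter (fun p => p.2 == r)).map (·.1)) ≠ []) := by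
    intro r
    rw [grp_contains]
    simp [List.any_eq_true, List.map_eq_nil_iff, List.filter_eq_nil_iff]
  have hG : ∀ r : String,
      (pairs.foldl (fun d p => d.modify p.2 [] (· ++ [p.1])) PySem.Dict.empty).getD r []
        = (pairs.filter (fun p => p.2 == r)).map (·.1) := by
    intro r; rw [grp_getD]; simp
  simp only [roleOrder, List.foldl_cons, List.foldl_nil]
  simp only [hG, hC]
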